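-- pv_equiv track=rewrite | github.com/gdfrh/AGV | robot_arm.py | find_index_of_agv
-- ===== SOURCE A (Python) =====
-- def find_index_of_agv(agv_count, idx):
--     # 根据全局小车索引找生产区小车索引
--     car_count = 0
--     # 遍历生产区
--     for zone_index, cars in enumerate(agv_count):
--         # 检查当前生产区是否包含目标索引
--         if idx < car_count + cars:
--             # 找到目标生产区
--             production_zone = zone_index  # 生产区从0开始
--             car_in_zone = idx - car_count  # 生产区内的小车编号，从0开始
--             break
--         # 更新已遍历的小车数量
--         car_count += cars
--     return production_zone, car_in_zone
-- ===== SOURCE B (Python) =====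
-- def find_index_of_agv(agv_count, idx):
--     # materialise the cumulative car counts, then locate the first zone whose
--     # cumulative count exceeds idx and reconstruct the in-zone index from it
--     prefix = []
--     total = 0
--     for cars in agv_count:
--         total += cars
--         prefix.append(total)
--     zone = next(i for i, p in enumerate(prefix) if idx < p)
--     return zone, idx - (prefix[zone - 1] if zone else 0)
-- ===== Notes on version B (the rewrite author's own statement) =====
-- stated objective: alternative
-- what changed: B materialises the cumulative-count prefix list in one pass and then locates the first zone whose cumulative count exceeds idx, reconstructing the in-zone index from the prefix list, instead of A's fused scan that carries a running sum and breaks with both results.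
import Mathlib
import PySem

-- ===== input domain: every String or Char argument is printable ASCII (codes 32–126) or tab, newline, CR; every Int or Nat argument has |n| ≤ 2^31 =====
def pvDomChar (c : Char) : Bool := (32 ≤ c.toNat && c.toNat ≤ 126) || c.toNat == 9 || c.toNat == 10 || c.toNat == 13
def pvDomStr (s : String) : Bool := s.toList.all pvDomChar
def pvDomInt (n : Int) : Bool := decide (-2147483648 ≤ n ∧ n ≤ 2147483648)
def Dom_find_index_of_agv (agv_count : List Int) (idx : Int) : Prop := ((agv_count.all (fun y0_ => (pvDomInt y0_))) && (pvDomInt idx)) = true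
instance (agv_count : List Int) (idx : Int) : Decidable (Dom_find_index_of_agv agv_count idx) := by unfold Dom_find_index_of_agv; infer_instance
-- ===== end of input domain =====

-- B materialises the prefix-sum list and then finds the first crossing zone from it,
-- instead of A's fused scan with a running sum and break (alternative decomposition,
-- same asymptotic cost).

-- ===== PORT A =====
-- A's for-loop with break; `none` marks the fall-through where the Python raises
-- UnboundLocalError (excluded by Pre_).
def pvScanA : List Int → Int → Int → Int → Option (Int × Int)
  | [], _, _, _ => none
  | cars :: rest, idx, zone, car_count =>
    if idx < car_count + cars then some (zone, idx - car_count)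
    else pvScanA rest idx (zone + 1) (car_count + cars)

def find_index_of_agv (agv_count : List Int) (idx : Int) : Int × Int :=
  (pvScanA agv_count idx 0 0).getD (0, 0)

-- ===== PORT B =====
-- the prefix-building for-loop of Source B
def pvAccum : List Int → Int → List Int
  | [], _ => []
  | cars :: rest, total => (total + cars) :: pvAccum rest (total + cars)

-- Source B's `next(i for i, p in enumerate(prefix) if idx < p)`: index of the first
-- element exceeding idx; `none` marks StopIteration (excluded by Pre_)
def pvFirstIdx (idx : Int) : List Int → Option Nat
  | [] => none
  | p :: rest => if idx < p then some 0 else (pvFirstIdx idx rest).map (· + 1)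

def find_index_of_agv_alt (agv_count : List Int) (idx : Int) : Int × Int :=
  let pfx := pvAccum agv_count 0
  match pvFirstIdx idx pfx with
  | none => (0, 0)  -- StopIteration: excluded by Pre_ (A raises there too)
  | some zone =>
    -- pfx[zone-1]: in range since zone < len, exact for zone ≥ 1
    ((zone : Int), idx - (if zone = 0 then 0 else pfx.getD (zone - 1) 0))

-- ===== PRECONDITION & SPEC =====
-- Pre_ holds exactly when some zone's cumulative count exceeds idx — precisely the
-- inputs on which Python A returns (otherwise A's loop falls through and raises
-- UnboundLocalError, and B's next(...) raises StopIteration).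
def Pre_find_index_of_agv (agv_count : List Int) (idx : Int) : Prop :=
  ∃ i ∈ List.range agv_count.length, idx < (agv_count.take (i + 1)).sum

instance (agv_count : List Int) (idx : Int) : Decidable (Pre_find_index_of_agv agv_count idx) := by
  unfold Pre_find_index_of_agv; infer_instance

def pvWitness_find_index_of_agv : List Int × Int := ([2, 3], 3)

def Spec_find_index_of_agv (agv_count : List Int) (idx : Int) (out : Int × Int) : Prop :=
  out = find_index_of_agv_alt agv_count idx
instance (agv_count : List Int) (idx : Int) (out : Int × Int) : Decidable (Spec_find_index_of_agv agv_count idx out) := by unfold Spec_find_index_of_agv; infer_instance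

-- ===== CLAIM (what is proved, stated in full; the proofs are below) =====
def Claim_equal_find_index_of_agv : Prop := ∀ (agv_count : List Int) (idx : Int), Dom_find_index_of_agv agv_count idx → Pre_find_index_of_agv agv_count idx → Spec_find_index_of_agv agv_count idx (find_index_of_agv agv_count idx)

-- ===== LEMMAS AND PROOFS =====

theorem pvAccum_length (l : List Int) (cc : Int) : (pvAccum l cc).length = l.length := by
  induction l generalizing cc with
  | nil => rfl
  | cons c rest ih => simp [pvAccum, ih]

-- partial sums of pvAccum are the take-sums shifted by the accumulator
theorem pvAccum_getD (l : List Int) (cc : Int) :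
    ∀ i < l.length, (pvAccum l cc).getD i 0 = cc + (l.take (i + 1)).sum := by
  induction l generalizing cc with
  | nil => intro i hi; simp at hi
  | cons c rest ih =>
    intro i hi
    cases i with
    | zero => simp [pvAccum]
    | succ i =>
      simp only [pvAccum, List.getD_cons_succ, List.take_succ_cons, List.sum_cons]
      rw [ih (cc + c) i (by simpa using hi)]
      ring

-- the first-crossing search fails exactly when no element exceeds idx
theorem pvFirstIdx_none (idx : Int) (l : List Int) :
    pvFirstIdx idx l = none ↔ ∀ p ∈ l, p ≤ idx := by
  induction l with
  | nil => simp [pvFirstIdx]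
  | cons p rest ih =>
    by_cases h : idx < p
    · simp only [pvFirstIdx, if_pos h]
      constructor
      · intro hc; exact absurd hc (by simp)
      · intro hall; exact absurd (hall p (by simp)) (by omega)
    · simp only [pvFirstIdx, if_neg h]
      rw [Option.map_eq_none_iff, ih]
      constructor
      · intro hall q hq
        rcases List.mem_cons.mp hq with hq | hq
        · omega
        · exact hall q hq
      · intro hall q hq; exact hall q (by simp [hq])

-- A's fused scan computes exactly B's decomposition: the first crossing index of the
-- prefix-sum list, with the in-zone index reconstructed from that list
theorem pvScanA_eq (l : List Int) (idx : Int) :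
    ∀ (zone cc : Int),
      pvScanA l idx zone cc =
        (pvFirstIdx idx (pvAccum l cc)).map
          (fun (t : Nat) => ((zone + t : Int),
                     idx - (if t = 0 then cc else (pvAccum l cc).getD (t - 1) 0))) := by
  induction l with
  | nil => intro zone cc; simp [pvScanA, pvAccum, pvFirstIdx]
  | cons c rest ih =>
    intro zone cc
    by_cases h : idx < cc + c
    · simp [pvScanA, pvAccum, pvFirstIdx, h]
    · simp only [pvScanA, if_neg h, pvAccum, pvFirstIdx,
        if_neg (show ¬ idx < cc + c from h), ih (zone + 1) (cc + c), Option.map_map]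
      cases hfi : pvFirstIdx idx (pvAccum rest (cc + c)) with
      | none => simp
      | some t =>
        simp only [Option.map_some, Function.comp_apply, Option.some.injEq, Prod.mk.injEq]
        refine ⟨by push_cast; ring, ?_⟩
        cases t with
        | zero => simp
        | succ t' => simp

-- ===== VERDICT (by name: the statement is the Claim_ definition above) =====
theorem find_index_of_agv_spec : Claim_equal_find_index_of_agv := by
  intro agv idx _ hpre
  obtain ⟨i, hilen, hcross⟩ := hpre
  rw [List.mem_range] at hilen
  show find_index_of_agv agv idx = find_index_of_agv_alt agv idx
  have hkey := pvScanA_eq agv idx 0 0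
  cases hfi : pvFirstIdx idx (pvAccum agv 0) with
  | none =>
    exfalso
    have hall := (pvFirstIdx_none idx (pvAccum agv 0)).mp hfi
    have hlen' : i < (pvAccum agv 0).length := by rw [pvAccum_length]; exact hilen
    have hmem : (pvAccum agv 0)[i] ∈ pvAccum agv 0 := List.getElem_mem hlen'
    have hle := hall _ hmem
    have hg : (pvAccum agv 0).getD i 0 = (pvAccum agv 0)[i] :=
      List.getD_eq_getElem _ _ hlen'
    rw [pvAccum_getD agv 0 i hilen] at hg
    omega
  | some z =>
    simp only [find_index_of_agv, hkey, hfi, Option.map_some, Option.getD_some,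
      find_index_of_agv_alt]
    simp
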